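-- pv_equiv track=rewrite | github.com/weilin199204/xdalgorithm_XtalPi | xdalgorithm/engines/utils.py | up_and_flat
-- ===== SOURCE A (Python) =====
-- def up_and_flat(level_diffs):
--     num_diffs = len(level_diffs)
--     if num_diffs == 1:
--         return False
--     diff_tag = -1
--     for i, level_diff in enumerate(level_diffs):
--         if i == 0:
--             if level_diff >= 0:
--                 return False
--         if diff_tag == -1:
--             if level_diff == 0:
--                 diff_tag = 0
--             elif level_diff > 0:
--                 return False
--         if diff_tag == 0:
--             if level_diff != 0:
--                 return False
--     return True
-- ===== SOURCE B (Python) =====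
-- def up_and_flat(level_diffs):
--     n = len(level_diffs)
--     if n == 1:
--         return False
--     if n == 0:
--         return True
--     i = 0
--     while i < n and level_diffs[i] < 0:
--         i += 1
--     if i == 0:
--         return False
--     return all(d == 0 for d in level_diffs[i:])
-- ===== Notes on version B (the rewrite author's own statement) =====
-- stated objective: simpler
-- what changed: Replaced A's single stateful loop with a diff_tag state machine and in-loop first-element check by an explicit decomposition: handle the length 0/1 cases, count the leading strictly-negative prefix, then require everything after it to be zero.
import Mathlib
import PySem

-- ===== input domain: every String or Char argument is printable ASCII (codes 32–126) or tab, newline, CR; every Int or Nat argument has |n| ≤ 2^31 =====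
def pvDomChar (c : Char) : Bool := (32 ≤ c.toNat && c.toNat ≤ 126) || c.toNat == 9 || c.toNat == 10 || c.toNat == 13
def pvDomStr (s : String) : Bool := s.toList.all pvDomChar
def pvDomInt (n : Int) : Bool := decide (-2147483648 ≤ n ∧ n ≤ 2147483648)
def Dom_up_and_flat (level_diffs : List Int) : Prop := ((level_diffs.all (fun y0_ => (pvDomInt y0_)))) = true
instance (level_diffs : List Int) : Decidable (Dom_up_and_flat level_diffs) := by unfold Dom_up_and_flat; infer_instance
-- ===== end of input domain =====

-- B replaces A's stateful tag-machine loop by an explicit decomposition (length cases,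
-- leading negative-prefix count, all-zero suffix check); same values, simpler to read.


-- ===== PORT A =====
-- A's for-loop over enumerate(level_diffs) with state diff_tag and early returns.
def upLoopA : List Int → Nat → Int → Bool
  | [], _, _ => true
  | d :: rest, i, tag =>
    if i = 0 ∧ 0 ≤ d then false
    else
      let tag' := if tag = -1 ∧ d = 0 then 0 else tag
      if tag = -1 ∧ 0 < d then false
      else if tag' = 0 ∧ d ≠ 0 then false
      else upLoopA rest (i + 1) tag'

def up_and_flat (level_diffs : List Int) : Bool :=
  if level_diffs.length = 1 then false
  else upLoopA level_diffs 0 (-1)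

-- ===== PORT B =====
-- the while-loop: length of the leading strictly-negative run
def negPrefixLen : List Int → Nat
  | [] => 0
  | d :: rest => if d < 0 then negPrefixLen rest + 1 else 0

def up_and_flat_alt (level_diffs : List Int) : Bool :=
  if level_diffs.length = 1 then false
  else if level_diffs.length = 0 then true
  else
    let i := negPrefixLen level_diffs
    if i = 0 then false
    else (level_diffs.drop i).all (· == 0)

-- ===== PRECONDITION & SPEC =====
def Spec_up_and_flat (level_diffs : List Int) (out : Bool) : Prop := out = up_and_flat_alt level_diffs
instance (level_diffs : List Int) (out : Bool) : Decidable (Spec_up_and_flat level_diffs out) := by unfold Spec_up_and_flat; infer_instance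

-- ===== CLAIM (what is proved, stated in full; the proofs are below) =====
def Claim_equal_up_and_flat : Prop := ∀ (level_diffs : List Int), Dom_up_and_flat level_diffs → Spec_up_and_flat level_diffs (up_and_flat level_diffs)

-- ===== LEMMAS AND PROOFS =====
-- with tag = 0 and a positive index, the loop accepts iff the rest is all zero
theorem upLoopA_tag0 (xs : List Int) (i : Nat) :
    upLoopA xs (i + 1) 0 = xs.all (· == 0) := by
  induction xs generalizing i with
  | nil => rfl
  | cons d rest ih =>
    simp only [upLoopA, List.all_cons]
    by_cases hd : d = 0
    · simp [hd, ih (i + 1)]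
    · simp [hd]

-- with tag = -1 and a positive index, the loop accepts iff xs is a negative prefix
-- followed by an all-zero suffix
theorem upLoopA_tagm1 (xs : List Int) (i : Nat) :
    upLoopA xs (i + 1) (-1) = (xs.drop (negPrefixLen xs)).all (· == 0) := by
  induction xs generalizing i with
  | nil => rfl
  | cons d rest ih =>
    simp only [upLoopA, negPrefixLen]
    rcases lt_trichotomy d 0 with hd | hd | hd
    · have h1 : ¬ (d = 0) := by omega
      have h2 : ¬ (0 < d) := by omega
      simp [h1, h2, hd, ih (i + 1)]
    · simp [hd, upLoopA_tag0]
    · have h1 : ¬ (d = 0) := by omega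
      have h2 : ¬ (d < 0) := by omega
      simp [h1, h2, hd]

-- ===== VERDICT (by name: the statement is the Claim_ definition above) =====
theorem up_and_flat_spec : Claim_equal_up_and_flat := by
  intro xs _
  show up_and_flat xs = up_and_flat_alt xs
  unfold up_and_flat up_and_flat_alt
  by_cases h1 : xs.length = 1
  · simp [h1]
  · simp only [h1, if_false]
    match xs with
    | [] => rfl
    | d :: rest =>
      simp only [List.length_cons, Nat.succ_ne_zero, if_false, upLoopA, negPrefixLen]
      rcases lt_trichotomy d 0 with hd | hd | hd
      · have h2 : ¬ (0 ≤ d) := by omega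
        have h3 : ¬ (d = 0) := by omega
        have h4 : ¬ (0 < d) := by omega
        simp [h2, h3, h4, hd, upLoopA_tagm1]
      · simp [hd]
      · have h2 : (0 : Int) ≤ d := by omega
        have h3 : ¬ (d < 0) := by omega
        simp [h2, h3]
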